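-- pv_equiv track=rewrite | github.com/eerimoq/detools | detools/sais.py | guess_lms_sort
-- ===== SOURCE A (Python) =====
-- S_TYPE = ord("S")
--
-- L_TYPE = ord("L")
--
-- def is_lms_char(offset, typemap):
--     if offset == 0:
--         return False
--
--     if typemap[offset] == S_TYPE and typemap[offset - 1] == L_TYPE:
--         return True
--
--     return False
--
-- def find_bucket_tails(bucket_sizes):
--     offset = 1
--     res = []
--
--     for size in bucket_sizes:
--         offset += size
--         res.append(offset - 1)
--
--     return res
--
-- def guess_lms_sort(string, bucket_sizes, typemap):
--     guessed_suffix_array = [-1] * (len(string) + 1)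
--     bucket_tails = find_bucket_tails(bucket_sizes)
--
--     for i in range(len(string)):
--         if not is_lms_char(i, typemap):
--             continue
--
--         bucket_index = string[i]
--         guessed_suffix_array[bucket_tails[bucket_index]] = i
--         bucket_tails[bucket_index] -= 1
--
--     guessed_suffix_array[0] = len(string)
--
--     return guessed_suffix_array
-- ===== SOURCE B (Python) =====
-- S_TYPE = ord("S")
--
-- L_TYPE = ord("L")
--
-- def is_lms_char(offset, typemap):
--     if offset == 0:
--         return False
--
--     if typemap[offset] == S_TYPE and typemap[offset - 1] == L_TYPE:
--         return True
--
--     return False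
--
-- def find_bucket_tails(bucket_sizes):
--     offset = 1
--     res = []
--
--     for size in bucket_sizes:
--         offset += size
--         res.append(offset - 1)
--
--     return res
--
-- def guess_lms_sort(string, bucket_sizes, typemap):
--     # Two-phase: collect LMS positions once, then fill each bucket's tail
--     # region in one go, bucket by bucket, instead of A's interleaved
--     # single pass with mutable tail pointers.
--     n = len(string)
--     lms = [i for i in range(n) if is_lms_char(i, typemap)]
--     guessed_suffix_array = [-1] * (n + 1)
--     bucket_tails = find_bucket_tails(bucket_sizes)
--
--     for c in range(len(bucket_sizes)):
--         tail = bucket_tails[c]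
--         for k, i in enumerate([i for i in lms if string[i] == c]):
--             guessed_suffix_array[tail - k] = i
--
--     guessed_suffix_array[0] = n
--
--     return guessed_suffix_array
-- ===== Notes on version B (the rewrite author's own statement) =====
-- stated objective: alternative
-- what changed: A makes one interleaved pass over the string, mutating a bucket_tails array as it places each LMS suffix; B first collects the LMS positions in one scan and then fills each bucket's tail region in a separate bucket-by-bucket placement phase with a fixed tail table.
-- outside the precondition, e.g. on guess_lms_sort([0, -1, 0], [1, 1], [76, 83, 76]): A returns [3, -1, 1, -1], B returns [3, -1, -1, -1]
import Mathlib
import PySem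

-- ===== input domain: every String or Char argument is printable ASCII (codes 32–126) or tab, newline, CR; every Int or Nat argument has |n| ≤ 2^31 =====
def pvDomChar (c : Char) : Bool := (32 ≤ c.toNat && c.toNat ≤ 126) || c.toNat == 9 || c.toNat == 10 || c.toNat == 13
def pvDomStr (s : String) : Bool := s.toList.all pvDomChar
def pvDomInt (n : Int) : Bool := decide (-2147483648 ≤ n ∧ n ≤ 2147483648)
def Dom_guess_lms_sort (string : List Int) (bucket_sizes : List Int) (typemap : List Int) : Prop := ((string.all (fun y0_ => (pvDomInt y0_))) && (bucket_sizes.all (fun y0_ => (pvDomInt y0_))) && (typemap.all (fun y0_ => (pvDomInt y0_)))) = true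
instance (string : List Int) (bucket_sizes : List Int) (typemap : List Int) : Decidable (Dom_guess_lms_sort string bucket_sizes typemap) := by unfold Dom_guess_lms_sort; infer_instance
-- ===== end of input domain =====

-- B replaces A's single interleaved pass with mutable tail pointers by a two-phase
-- grouping: collect the LMS positions once, then fill each bucket's tail region
-- bucket by bucket (objective: alternative decomposition, same cost).

-- ===== PORT A =====
def S_TYPE : Int := 83   -- ord("S")
def L_TYPE : Int := 76   -- ord("L")

def is_lms_char (offset : Int) (typemap : List Int) : Bool :=
  if offset == 0 then false
  else if PySem.List.pyGetD typemap offset 0 == S_TYPE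
          && PySem.List.pyGetD typemap (offset - 1) 0 == L_TYPE then true
  else false
-- typemap[offset] is PySem.List.pyGetD: exact whenever the offset is in range,
-- which Pre_ guarantees for every access the ports make.

def find_bucket_tails (bucket_sizes : List Int) : List Int :=
  (bucket_sizes.foldl
    (fun (st : Int × List Int) size => (st.1 + size, st.2 ++ [st.1 + size - 1]))
    (1, [])).2

def guess_lms_sort (string : List Int) (bucket_sizes : List Int) (typemap : List Int) : List Int :=
  let gsa0 := List.replicate (string.length + 1) (-1 : Int)
  let tails0 := find_bucket_tails bucket_sizes
  let st := (List.range string.length).foldl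
    (fun (st : List Int × List Int) (i : Nat) =>
      if is_lms_char (i : Int) typemap then
        let c := PySem.List.pyGetD string (i : Int) 0
        let t := PySem.List.pyGetD st.2 c 0
        (PySem.List.pySetD st.1 t (i : Int), PySem.List.pySetD st.2 c (t - 1))
      else st)
    (gsa0, tails0)
  PySem.List.pySetD st.1 0 (PySem.List.len string)

-- ===== PORT B =====
def guess_lms_sort_alt (string : List Int) (bucket_sizes : List Int) (typemap : List Int) : List Int :=
  let lms := (List.range string.length).filter (fun (i : Nat) => is_lms_char (i : Int) typemap)
  let gsa0 := List.replicate (string.length + 1) (-1 : Int)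
  let tails0 := find_bucket_tails bucket_sizes
  let gsa := (List.range bucket_sizes.length).foldl
    (fun g (c : Nat) =>
      let tail := PySem.List.pyGetD tails0 (c : Int) 0
      (PySem.List.enumerate (lms.filter (fun (i : Nat) => PySem.List.pyGetD string (i : Int) 0 == (c : Int)))).foldl
        (fun g ki => PySem.List.pySetD g (tail - ki.1) (ki.2 : Int)) g)
    gsa0
  PySem.List.pySetD gsa 0 (PySem.List.len string)

-- ===== PRECONDITION & SPEC =====
-- Spec-side views of the data both programs are about.
def lmsList (string typemap : List Int) : List Nat :=
  (List.range string.length).filter (fun (i : Nat) => is_lms_char (i : Int) typemap)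
def lmsChar (string : List Int) (i : Nat) : Int := PySem.List.pyGetD string (i : Int) 0
def lmsRank (string typemap : List Int) (i : Nat) : Nat :=
  ((lmsList string typemap).filter
    (fun j => decide (j < i) && (lmsChar string j == lmsChar string i))).length
def lmsSlot (string bucket_sizes typemap : List Int) (i : Nat) : Int :=
  PySem.List.pyGetD (find_bucket_tails bucket_sizes) (lmsChar string i) 0
    - (lmsRank string typemap i : Int)

-- Pre_ excludes exactly the degenerate inputs: a typemap shorter than the string
-- (A raises IndexError), an LMS character or target slot outside its table
-- (A raises IndexError or wraps around at a negative index), and bucket tables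
-- inconsistent with the string under which two LMS placements collide in one
-- cell — there A's surviving value is an accident of its interleaved write order.
def Pre_guess_lms_sort (string : List Int) (bucket_sizes : List Int) (typemap : List Int) : Prop :=
  (2 ≤ string.length → string.length ≤ typemap.length) ∧
  (∀ i ∈ lmsList string typemap,
      0 ≤ lmsChar string i ∧ lmsChar string i < (bucket_sizes.length : Int)) ∧
  (∀ i ∈ lmsList string typemap,
      0 ≤ lmsSlot string bucket_sizes typemap i ∧
      lmsSlot string bucket_sizes typemap i ≤ (string.length : Int)) ∧
  (∀ i ∈ lmsList string typemap, ∀ j ∈ lmsList string typemap, i ≠ j →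
      lmsSlot string bucket_sizes typemap i ≠ lmsSlot string bucket_sizes typemap j)
instance (string : List Int) (bucket_sizes : List Int) (typemap : List Int) : Decidable (Pre_guess_lms_sort string bucket_sizes typemap) := by unfold Pre_guess_lms_sort; infer_instance

def pvWitness_guess_lms_sort : List Int × List Int × List Int :=
  ([1, 0, 1, 0], [2, 2], [76, 83, 76, 83])

def Spec_guess_lms_sort (string : List Int) (bucket_sizes : List Int) (typemap : List Int) (out : List Int) : Prop := out = guess_lms_sort_alt string bucket_sizes typemap
instance (string : List Int) (bucket_sizes : List Int) (typemap : List Int) (out : List Int) : Decidable (Spec_guess_lms_sort string bucket_sizes typemap out) := by unfold Spec_guess_lms_sort; infer_instance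

-- ===== CLAIM (what is proved, stated in full; the proofs are below) =====
def Claim_equal_guess_lms_sort : Prop := ∀ (string : List Int) (bucket_sizes : List Int) (typemap : List Int), Dom_guess_lms_sort string bucket_sizes typemap → Pre_guess_lms_sort string bucket_sizes typemap → Spec_guess_lms_sort string bucket_sizes typemap (guess_lms_sort string bucket_sizes typemap)

-- ===== LEMMAS AND PROOFS =====

-- Apply a list of (slot, value) writes from the left.
def applyW (ws : List (Int × Int)) (g : List Int) : List Int :=
  ws.foldl (fun g p => PySem.List.pySetD g p.1 p.2) g

-- The write sequence A's loop performs, with the evolving tail table made explicit.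
def wseq (string : List Int) : List Int → List Nat → List (Int × Int)
  | _, [] => []
  | t, i :: M =>
    (PySem.List.pyGetD t (lmsChar string i) 0, (i : Int)) ::
      wseq string
        (PySem.List.pySetD t (lmsChar string i)
          (PySem.List.pyGetD t (lmsChar string i) 0 - 1)) M

theorem pyGetD_pySetD_int (t : List Int) (a b : Int) (v : Int)
    (ha : 0 ≤ a) (ha2 : a < (t.length : Int)) (hb : 0 ≤ b) :
    PySem.List.pyGetD (PySem.List.pySetD t a v) b 0
      = if b = a then v else PySem.List.pyGetD t b 0 := by
  rw [PySem.List.pySetD_of_nonneg _ _ ha]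
  by_cases hbl : b < (t.length : Int)
  · rw [PySem.List.pyGetD_eq_getElem _ _ hb (by simpa using hbl),
        PySem.List.pyGetD_eq_getElem _ _ hb hbl, List.getElem_set]
    split_ifs with h1 h2 h3 <;>
      first
      | rfl
      | (exact absurd (by omega : b = a) h2)
      | (exact absurd (by omega : a.toNat = b.toNat) h1)
  · have hne : ¬ (b = a) := by omega
    rw [if_neg hne,
        PySem.List.pyGetD_of_none _ _ _ (by
          rw [PySem.List.pyGet?_eq_none_iff]; simp [PySem.Raise.InRange]; omega),
        PySem.List.pyGetD_of_none _ _ _ (by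
          rw [PySem.List.pyGet?_eq_none_iff]; simp [PySem.Raise.InRange]; omega)]

theorem length_find_bucket_tails_aux (l : List Int) :
    ∀ (o : Int) (acc : List Int),
      ((l.foldl (fun (st : Int × List Int) size =>
          (st.1 + size, st.2 ++ [st.1 + size - 1])) (o, acc)).2).length
        = acc.length + l.length := by
  induction l with
  | nil => intro o acc; simp
  | cons x l ih =>
    intro o acc
    simp only [List.foldl_cons]
    rw [ih]
    simp
    omega

theorem length_find_bucket_tails (bs : List Int) :
    (find_bucket_tails bs).length = bs.length := by
  unfold find_bucket_tails
  rw [length_find_bucket_tails_aux]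
  simp

theorem lmsList_pairwise (s tm : List Int) : (lmsList s tm).Pairwise (· < ·) :=
  List.Pairwise.sublist List.filter_sublist List.pairwise_lt_range

theorem lmsList_nodup (s tm : List Int) : (lmsList s tm).Nodup :=
  (List.nodup_range).filter _

theorem rank_prefix (s tm : List Int) (P M : List Nat) (i : Nat)
    (h : lmsList s tm = P ++ i :: M) :
    lmsRank s tm i = (P.filter (fun j => lmsChar s j == lmsChar s i)).length := by
  have hpw : (P ++ i :: M).Pairwise (· < ·) := h ▸ lmsList_pairwise s tm
  rw [List.pairwise_append] at hpw
  obtain ⟨hP, hM, hrel⟩ := hpw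
  unfold lmsRank
  rw [h, List.filter_append, List.length_append]
  have h1 : P.filter (fun j => decide (j < i) && (lmsChar s j == lmsChar s i))
      = P.filter (fun j => lmsChar s j == lmsChar s i) := by
    apply List.filter_congr
    intro j hj
    have : j < i := hrel j hj i (by simp)
    simp [this]
  have h2 : (i :: M).filter (fun j => decide (j < i) && (lmsChar s j == lmsChar s i)) = [] := by
    rw [List.filter_eq_nil_iff]
    intro j hj
    rcases List.mem_cons.mp hj with rfl | hj
    · simp
    · have : i < j := (List.pairwise_cons.mp hM).1 j hj
      simp [Nat.not_lt.mpr (Nat.le_of_lt this)]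
  rw [h1, h2]
  simp

theorem foldA_eq_applyW (s : List Int) (M : List Nat) : ∀ (t g : List Int),
    (M.foldl
      (fun (st : List Int × List Int) (i : Nat) =>
        (PySem.List.pySetD st.1 (PySem.List.pyGetD st.2 (PySem.List.pyGetD s (i : Int) 0) 0) (i : Int),
         PySem.List.pySetD st.2 (PySem.List.pyGetD s (i : Int) 0)
           (PySem.List.pyGetD st.2 (PySem.List.pyGetD s (i : Int) 0) 0 - 1)))
      (g, t)).1 = applyW (wseq s t M) g := by
  induction M with
  | nil => intro t g; rfl
  | cons i M ih =>
    intro t g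
    simp only [List.foldl_cons, wseq, applyW, List.foldl_cons]
    exact ih _ _

theorem wseq_eq_map (s bs tm : List Int) :
    ∀ (M P : List Nat) (t : List Int),
      lmsList s tm = P ++ M →
      t.length = bs.length →
      (∀ i ∈ M, 0 ≤ lmsChar s i ∧ lmsChar s i < (t.length : Int)) →
      (∀ i ∈ M, PySem.List.pyGetD t (lmsChar s i) 0
        = PySem.List.pyGetD (find_bucket_tails bs) (lmsChar s i) 0
          - ((P.filter (fun j => lmsChar s j == lmsChar s i)).length : Int)) →
      wseq s t M = M.map (fun i => (lmsSlot s bs tm i, (i : Int))) := by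
  intro M
  induction M with
  | nil => intro P t _ _ _ _; rfl
  | cons i M ih =>
    intro P t hL hlen hbnd hinv
    have hbi := hbnd i (by simp)
    have hslot : PySem.List.pyGetD t (lmsChar s i) 0
        = lmsSlot s bs tm i := by
      rw [hinv i (by simp)]
      unfold lmsSlot
      rw [rank_prefix s tm P M i hL]
    simp only [wseq, List.map_cons]
    rw [hslot]
    congr 1
    apply ih (P ++ [i]) _ (by rw [hL]; simp) (by rw [PySem.List.length_pySetD]; exact hlen)
    · intro j hj
      have := hbnd j (List.mem_cons_of_mem _ hj)
      simpa [PySem.List.length_pySetD] using this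
    · intro j hj
      have hbj := hbnd j (List.mem_cons_of_mem _ hj)
      rw [pyGetD_pySetD_int t (lmsChar s i) (lmsChar s j) _ hbi.1 hbi.2 hbj.1,
          List.filter_append, List.length_append]
      by_cases hc : lmsChar s j = lmsChar s i
      · rw [if_pos hc]
        have hone : (List.filter (fun j' => lmsChar s j' == lmsChar s j) [i]).length = 1 := by
          simp [hc]
        have hr := rank_prefix s tm P M i hL
        rw [hone, hc]
        unfold lmsSlot
        rw [hr]
        push_cast
        ring
      · rw [if_neg hc]
        have hzero : (List.filter (fun j' => lmsChar s j' == lmsChar s j) [i]).length = 0 := by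
          simp
          exact fun h => (hc h.symm).elim
        rw [hzero, hinv j (List.mem_cons_of_mem _ hj)]
        push_cast
        ring

theorem filter_rank (Lst : List Nat) (p : Nat → Bool) (hp : Lst.Pairwise (· < ·)) :
    ∀ (k : Nat) (hk : k < (Lst.filter p).length),
      (Lst.filter (fun j => decide (j < (Lst.filter p)[k]) && p j)).length = k := by
  induction Lst with
  | nil => intro k hk; simp at hk
  | cons a L ih =>
    intro k hk
    have hrel : ∀ b ∈ L, a < b := (List.pairwise_cons.mp hp).1
    have hpL : L.Pairwise (· < ·) := (List.pairwise_cons.mp hp).2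
    by_cases hpa : p a
    · have hq : (a :: L).filter p = a :: L.filter p := by simp [hpa]
      cases k with
      | zero =>
        have hq0 : ((a :: L).filter p)[0] = a := by simp [hq]
        have hnil : (a :: L).filter
            (fun j => decide (j < ((a :: L).filter p)[0]) && p j) = [] := by
          rw [List.filter_eq_nil_iff]
          intro j hj
          simp only [hq0, Bool.and_eq_true, decide_eq_true_eq, not_and]
          intro hlt
          rcases List.mem_cons.mp hj with rfl | hj
          · exact absurd hlt (by omega)
          · exact absurd hlt (by have := hrel j hj; omega)
        rw [hnil]
        rfl
      | succ k =>
        have hk' : k < (L.filter p).length := by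
          rw [hq] at hk; simpa using hk
        have hqk : ((a :: L).filter p)[k+1] = (L.filter p)[k] := by
          simp [hq]
        have hmem : (L.filter p)[k] ∈ L := List.mem_of_mem_filter (List.getElem_mem hk')
        have halt : a < (L.filter p)[k] := hrel _ hmem
        have hpred : ∀ j, (decide (j < ((a :: L).filter p)[k + 1]) && p j)
            = (decide (j < (L.filter p)[k]) && p j) := by intro j; rw [hqk]
        rw [List.filter_congr (fun j _ => hpred j), List.filter_cons,
            if_pos (by simp [hpa, halt]), List.length_cons]
        rw [ih hpL k hk']
    · have hq : (a :: L).filter p = L.filter p := by simp [hpa]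
      have hk' : k < (L.filter p).length := by rw [hq] at hk; exact hk
      rw [List.filter_cons]
      rw [if_neg (by simp [hpa])]
      have hqk : ((a :: L).filter p)[k] = (L.filter p)[k] := by simp [hq]
      simp only [hqk]
      exact ih hpL k hk'

theorem count_flat (Lst : List Nat) (f : Nat → Int) :
    ∀ (σ : Nat) (a : Nat),
      ((List.range σ).flatMap (fun c : Nat => Lst.filter (fun i => f i == (c : Int)))).count a
        = if 0 ≤ f a ∧ f a < (σ : Int) then Lst.count a else 0 := by
  intro σ
  induction σ with
  | zero => intro a; rw [if_neg (by omega)]; simp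
  | succ σ ih =>
    intro a
    rw [List.range_succ, List.flatMap_append, List.count_append, ih]
    have hlast : ((([σ] : List Nat).flatMap (fun c : Nat => Lst.filter (fun i => f i == (c : Int)))).count a)
        = if f a = (σ : Int) then Lst.count a else 0 := by
      simp only [List.flatMap_cons, List.flatMap_nil, List.append_nil]
      by_cases hfa : f a = (σ : Int)
      · rw [if_pos hfa]
        exact List.count_filter (by simp [hfa])
      · rw [if_neg hfa]
        rw [List.count_eq_zero]
        intro hmem
        exact hfa (by simpa using (List.mem_filter.mp hmem).2)
    rw [hlast]
    have : ((σ + 1 : Nat) : Int) = (σ : Int) + 1 := by push_cast; ring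
    rw [this]
    split_ifs <;> omega

theorem perm_flat (Lst : List Nat) (f : Nat → Int) (σ : Nat)
    (h : ∀ i ∈ Lst, 0 ≤ f i ∧ f i < (σ : Int)) :
    ((List.range σ).flatMap (fun c : Nat => Lst.filter (fun i => f i == (c : Int)))).Perm Lst := by
  rw [List.perm_iff_count]
  intro a
  rw [count_flat]
  by_cases ha : a ∈ Lst
  · rw [if_pos (h a ha)]
  · rw [List.count_eq_zero.mpr ha]
    split_ifs <;> rfl

theorem applyW_append (ws ws' : List (Int × Int)) (g : List Int) :
    applyW (ws ++ ws') g = applyW ws' (applyW ws g) := by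
  simp [applyW]

theorem applyW_flatMap {γ : Type} (l : List γ) (W : γ → List (Int × Int)) :
    ∀ g, l.foldl (fun g c => applyW (W c) g) g = applyW (l.flatMap W) g := by
  induction l with
  | nil => intro g; rfl
  | cons c l ih =>
    intro g
    rw [List.foldl_cons, List.flatMap_cons, applyW_append, ih]

theorem applyW_perm (ws ws' : List (Int × Int)) (h : ws.Perm ws') :
    (∀ p ∈ ws, 0 ≤ p.1) → (ws.map Prod.fst).Nodup → ∀ g, applyW ws g = applyW ws' g := by
  induction h with
  | nil => intro _ _ g; rfl
  | cons x h ih =>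
    intro hpos hnd g
    simp only [applyW, List.foldl_cons]
    exact ih (fun p hp => hpos p (List.mem_cons_of_mem _ hp))
      (by simpa using (List.nodup_cons.mp (by simpa using hnd)).2) _
  | swap x y l =>
    intro hpos hnd g
    simp only [applyW, List.foldl_cons]
    have hxy : y.1 ≠ x.1 := by
      simp only [List.map_cons, List.nodup_cons, List.mem_cons, not_or] at hnd
      exact hnd.1.1
    have hy : (0 : Int) ≤ y.1 := hpos y (by simp)
    have hx : (0 : Int) ≤ x.1 := hpos x (by simp)
    congr 1
    rw [PySem.List.pySetD_of_nonneg _ _ hy, PySem.List.pySetD_of_nonneg _ _ hx,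
        PySem.List.pySetD_of_nonneg _ _ hy, PySem.List.pySetD_of_nonneg _ _ hx]
    exact List.set_comm _ _ (by omega)
  | trans h1 h2 ih1 ih2 =>
    intro hpos hnd g
    rw [ih1 hpos hnd g]
    exact ih2 (fun p hp => hpos p (h1.symm.subset hp)) ((h1.map Prod.fst).nodup hnd) g

theorem enum_eq (s bs tm : List Int) (c : Nat) :
    (PySem.List.enumerate ((lmsList s tm).filter (fun i => lmsChar s i == (c : Int)))).map
      (fun ki => (PySem.List.pyGetD (find_bucket_tails bs) (c : Int) 0 - ki.1, (ki.2 : Int)))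
    = ((lmsList s tm).filter (fun i => lmsChar s i == (c : Int))).map
        (fun i => (lmsSlot s bs tm i, (i : Int))) := by
  apply List.ext_getElem
  · simp [PySem.List.length_enumerate]
  · intro k hk1 hk2
    have hkq : k < ((lmsList s tm).filter (fun i => lmsChar s i == (c : Int))).length := by
      simpa using hk2
    simp only [List.getElem_map]
    rw [PySem.List.getElem_enumerate _ _ _ (by simpa [PySem.List.length_enumerate] using hkq)]
    have hmem := List.getElem_mem hkq
    have hchar : lmsChar s ((lmsList s tm).filter (fun i => lmsChar s i == (c : Int)))[k]
        = (c : Int) := by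
      have := (List.mem_filter.mp hmem).2
      simpa using this
    have hrank : lmsRank s tm ((lmsList s tm).filter (fun i => lmsChar s i == (c : Int)))[k] = k := by
      unfold lmsRank
      have hcong : (lmsList s tm).filter
          (fun j => decide (j < ((lmsList s tm).filter (fun i => lmsChar s i == (c : Int)))[k])
            && (lmsChar s j == lmsChar s ((lmsList s tm).filter (fun i => lmsChar s i == (c : Int)))[k]))
          = (lmsList s tm).filter
          (fun j => decide (j < ((lmsList s tm).filter (fun i => lmsChar s i == (c : Int)))[k])
            && (lmsChar s j == (c : Int))) := by
        apply List.filter_congr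
        intro j _
        rw [hchar]
      rw [hcong]
      exact filter_rank (lmsList s tm) (fun i => lmsChar s i == (c : Int))
        (lmsList_pairwise s tm) k hkq
    unfold lmsSlot
    rw [hchar, hrank]
    simp

theorem A_char (s bs tm : List Int)
    (h2 : ∀ i ∈ lmsList s tm, 0 ≤ lmsChar s i ∧ lmsChar s i < (bs.length : Int)) :
    guess_lms_sort s bs tm
      = PySem.List.pySetD
          (applyW ((lmsList s tm).map (fun i => (lmsSlot s bs tm i, (i : Int))))
            (List.replicate (s.length + 1) (-1 : Int))) 0 (PySem.List.len s) := by
  simp only [guess_lms_sort]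
  rw [PySem.List.foldl_if_eq_foldl_filter]
  have hL : (List.range s.length).filter (fun (i : Nat) => is_lms_char (i : Int) tm) = lmsList s tm := rfl
  rw [hL, foldA_eq_applyW]
  rw [wseq_eq_map s bs tm (lmsList s tm) [] (find_bucket_tails bs) (by simp)
        (length_find_bucket_tails bs)
        (by rw [length_find_bucket_tails]; exact h2)
        (by intro i _; simp)]

theorem B_char (s bs tm : List Int) :
    guess_lms_sort_alt s bs tm
      = PySem.List.pySetD
          (applyW
            (((List.range bs.length).flatMap
                (fun c : Nat => (lmsList s tm).filter (fun i => lmsChar s i == (c : Int)))).map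
              (fun i => (lmsSlot s bs tm i, (i : Int))))
            (List.replicate (s.length + 1) (-1 : Int))) 0 (PySem.List.len s) := by
  simp only [guess_lms_sort_alt]
  have hstep : (fun (g : List Int) (c : Nat) =>
      (PySem.List.enumerate
          (((List.range s.length).filter (fun (i : Nat) => is_lms_char (i : Int) tm)).filter
            (fun (i : Nat) => PySem.List.pyGetD s (i : Int) 0 == (c : Int)))).foldl
        (fun g ki => PySem.List.pySetD g (PySem.List.pyGetD (find_bucket_tails bs) (c : Int) 0 - ki.1) (ki.2 : Int)) g)
      = (fun (g : List Int) (c : Nat) =>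
          applyW (((lmsList s tm).filter (fun i => lmsChar s i == (c : Int))).map
            (fun i => (lmsSlot s bs tm i, (i : Int)))) g) := by
    funext g c
    rw [← enum_eq s bs tm c]
    unfold applyW
    rw [List.foldl_map]
    rfl
  rw [hstep]
  have hflat := applyW_flatMap (List.range bs.length)
    (fun c : Nat => ((lmsList s tm).filter (fun i => lmsChar s i == (c : Int))).map
      (fun i => (lmsSlot s bs tm i, (i : Int))))
    (List.replicate (s.length + 1) (-1 : Int))
  rw [hflat]
  congr 1
  rw [List.map_flatMap]

-- ===== VERDICT (by name: the statement is the Claim_ definition above) =====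
theorem guess_lms_sort_spec : Claim_equal_guess_lms_sort := by
  intro s bs tm _ hpre
  obtain ⟨h1, h2, h3, h4⟩ := hpre
  unfold Spec_guess_lms_sort
  rw [A_char s bs tm h2, B_char s bs tm]
  have hperm : ((List.range bs.length).flatMap
      (fun c : Nat => (lmsList s tm).filter (fun i => lmsChar s i == (c : Int)))).Perm
      (lmsList s tm) := perm_flat (lmsList s tm) (lmsChar s) bs.length h2
  have hmemL : ∀ i ∈ (List.range bs.length).flatMap
      (fun c : Nat => (lmsList s tm).filter (fun i => lmsChar s i == (c : Int))),
      i ∈ lmsList s tm := by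
    intro i hi
    obtain ⟨c, _, hif⟩ := List.mem_flatMap.mp hi
    exact (List.mem_filter.mp hif).1
  have hpos : ∀ p ∈ ((List.range bs.length).flatMap
      (fun c : Nat => (lmsList s tm).filter (fun i => lmsChar s i == (c : Int)))).map
      (fun i => (lmsSlot s bs tm i, (i : Int))), (0 : Int) ≤ p.1 := by
    intro p hp
    obtain ⟨i, hi, rfl⟩ := List.mem_map.mp hp
    exact (h3 i (hmemL i hi)).1
  have hndL : ((lmsList s tm).map (fun i => lmsSlot s bs tm i)).Nodup := by
    apply List.Nodup.map_on _ (lmsList_nodup s tm)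
    intro x hx y hy hxy
    by_contra hne
    exact h4 x hx y hy hne hxy
  have hnd : ((((List.range bs.length).flatMap
      (fun c : Nat => (lmsList s tm).filter (fun i => lmsChar s i == (c : Int)))).map
      (fun i => (lmsSlot s bs tm i, (i : Int)))).map Prod.fst).Nodup := by
    rw [List.map_map]
    exact ((hperm.map (fun i => lmsSlot s bs tm i)).symm).nodup hndL
  rw [applyW_perm _ _ (hperm.map (fun i => (lmsSlot s bs tm i, (i : Int)))) hpos hnd]
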